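-- pv_equiv track=rewrite | github.com/CaiJingLong/marscode_prompt | 011.py | solution
-- ===== SOURCE A (Python) =====
-- def solution(values):
--     max_score = 0
--     for i in range(len(values)):
--         for j in range(i+1, len(values)):
--             score = values[i] + values[j] + i - j
--             if score > max_score:
--                 max_score = score
--     return max_score
-- ===== SOURCE B (Python) =====
-- def solution(values):
--     # One pass: for each j keep the running maximum of values[i] + i over i < j.
--     max_score = 0
--     if not values:
--         return 0
--     best = values[0]
--     for j in range(1, len(values)):
--         score = best + values[j] - j
--         if score > max_score:
--             max_score = score
--         cand = values[j] + j
--         if cand > best: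
--             best = cand
--     return max_score
-- ===== Notes on version B (the rewrite author's own statement) =====
-- stated objective: faster
-- what changed: replaced the nested loop over all pairs (i,j) by a single pass that keeps the running maximum of values[i]+i, so each j is scored against that maximum
import Mathlib
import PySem

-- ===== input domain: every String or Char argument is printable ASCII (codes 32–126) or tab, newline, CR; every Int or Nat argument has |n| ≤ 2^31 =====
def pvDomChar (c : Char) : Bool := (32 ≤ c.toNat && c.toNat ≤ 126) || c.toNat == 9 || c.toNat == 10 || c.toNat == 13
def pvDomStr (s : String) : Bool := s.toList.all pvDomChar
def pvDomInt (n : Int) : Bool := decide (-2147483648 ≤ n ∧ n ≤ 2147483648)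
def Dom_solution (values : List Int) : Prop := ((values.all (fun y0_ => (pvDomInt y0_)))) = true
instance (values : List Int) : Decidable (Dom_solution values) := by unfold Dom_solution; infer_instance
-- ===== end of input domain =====

-- B replaces A's O(n^2) scan over all pairs by a single pass keeping the running max of values[i]+i (faster).

-- ===== PORT A =====
def solution (values : List Int) : Int :=
  (PySem.List.pyRange 0 (values.length : Int) 1).foldl (fun max_score i =>
    (PySem.List.pyRange (i + 1) (values.length : Int) 1).foldl (fun max_score j =>
      let score := PySem.List.pyGetD values i 0 + PySem.List.pyGetD values j 0 + i - j
      if max_score < score then score else max_score) max_score) 0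

-- ===== PORT B =====
def solution_alt (values : List Int) : Int :=
  match values with
  | [] => 0
  | v0 :: _ =>
    ((PySem.List.pyRange 1 (values.length : Int) 1).foldl (fun (st : Int × Int) j =>
      let score := st.2 + PySem.List.pyGetD values j 0 - j
      let max_score := if st.1 < score then score else st.1
      let cand := PySem.List.pyGetD values j 0 + j
      (max_score, if st.2 < cand then cand else st.2)) (0, v0)).1

-- ===== PRECONDITION & SPEC =====
def Spec_solution (values : List Int) (out : Int) : Prop := out = solution_alt values
instance (values : List Int) (out : Int) : Decidable (Spec_solution values out) := by unfold Spec_solution; infer_instance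

-- ===== CLAIM (what is proved, stated in full; the proofs are below) =====
def Claim_equal_solution : Prop := ∀ (values : List Int), Dom_solution values → Spec_solution values (solution values)

-- ===== LEMMAS AND PROOFS =====

-- running maximum of values[i]+i over i ≤ k (B's `best` accumulator after step k)
def bestOf (values : List Int) : ℕ → Int
  | 0 => values.getD 0 0
  | k + 1 => max (bestOf values k) (values.getD (k + 1) 0 + ((k + 1 : ℕ) : Int))

-- score of the pair (i, j)
def sc (values : List Int) (i j : ℕ) : Int :=
  values.getD i 0 + values.getD j 0 + (i : Int) - (j : Int)

-- column maximum candidate for index j ≥ 1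
def col (values : List Int) (j : ℕ) : Int :=
  bestOf values (j - 1) + values.getD j 0 - (j : Int)

lemma ite_lt_eq_max (m x : Int) : (if m < x then x else m) = max m x := by omega

lemma foldl_max_le {c a : Int} {l : List Int} (h : a ≤ c) (h2 : ∀ x ∈ l, x ≤ c) :
    l.foldl max a ≤ c := by
  induction l generalizing a with
  | nil => exact h
  | cons x t ih =>
    exact ih (by have := h2 x (by simp); omega) (fun y hy => h2 y (by simp [hy]))

lemma foldl_foldl_max (L : ℕ → List Int) (r : List ℕ) (a : Int) :
    r.foldl (fun m i => (L i).foldl max m) a = (r.flatMap L).foldl max a := by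
  induction r generalizing a with
  | nil => rfl
  | cons i t ih => simp [List.foldl_append, ih]

lemma pyRange_cast (a len : ℕ) :
    PySem.List.pyRange (a : Int) ((a + len : ℕ) : Int) 1
      = (List.range' a len).map (fun j : ℕ => (j : Int)) := by
  rw [PySem.List.pyRange_one]
  have h : ((((a + len : ℕ) : Int)) - (a : Int)).toNat = len := by omega
  rw [h]
  simp only [List.range'_eq_map_range, List.map_map]
  exact List.map_congr_left (fun k _ => by simp)

lemma pyRange_cast_one (len : ℕ) :
    PySem.List.pyRange 1 (((1 + len : ℕ)) : Int) 1
      = (List.range' 1 len).map (fun j : ℕ => (j : Int)) := by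
  have := pyRange_cast 1 len
  simpa using this

lemma bestOf_ge (values : List Int) (k i : ℕ) (h : i ≤ k) :
    values.getD i 0 + (i : Int) ≤ bestOf values k := by
  induction k with
  | zero => interval_cases i; simp [bestOf]
  | succ k ih =>
    rcases Nat.lt_or_ge i (k + 1) with hlt | hge
    · calc values.getD i 0 + (i : Int) ≤ bestOf values k := ih (by omega)
        _ ≤ bestOf values (k + 1) := le_max_left _ _
    · have : i = k + 1 := by omega
      subst this
      exact le_max_right _ _

lemma bestOf_attains (values : List Int) (k : ℕ) :
    ∃ i ≤ k, bestOf values k = values.getD i 0 + (i : Int) := by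
  induction k with
  | zero => exact ⟨0, le_refl 0, by simp [bestOf]⟩
  | succ k ih =>
    rcases ih with ⟨i, hi, hv⟩
    rcases max_cases (bestOf values k) (values.getD (k + 1) 0 + ((k + 1 : ℕ) : Int)) with
      ⟨h, _⟩ | ⟨h, _⟩
    · exact ⟨i, by omega, by rw [bestOf]; rw [h, hv]⟩
    · exact ⟨k + 1, le_refl _, by rw [bestOf]; rw [h]⟩

-- the list of pair scores A folds over, and the list of column candidates B folds over
def pairsL (values : List Int) : List Int :=
  (List.range values.length).flatMap
    (fun i => (List.range' (i + 1) (values.length - (i + 1))).map (sc values i))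

def colsL (values : List Int) : List Int :=
  (List.range' 1 (values.length - 1)).map (col values)

lemma mem_pairsL {values : List Int} {x : Int} :
    x ∈ pairsL values ↔ ∃ i j, i < j ∧ j < values.length ∧ x = sc values i j := by
  simp only [pairsL, List.mem_flatMap, List.mem_range, List.mem_map, List.mem_range'_1]
  constructor
  · rintro ⟨i, hi, j, ⟨h1, h2⟩, rfl⟩
    exact ⟨i, j, by omega, by omega, rfl⟩
  · rintro ⟨i, j, h1, h2, rfl⟩
    exact ⟨i, by omega, j, ⟨by omega, by omega⟩, rfl⟩

lemma mem_colsL {values : List Int} {x : Int} :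
    x ∈ colsL values ↔ ∃ j, 1 ≤ j ∧ j < values.length ∧ x = col values j := by
  simp only [colsL, List.mem_map, List.mem_range'_1]
  constructor
  · rintro ⟨j, ⟨h1, h2⟩, rfl⟩; exact ⟨j, h1, by omega, rfl⟩
  · rintro ⟨j, h1, h2, rfl⟩; exact ⟨j, ⟨h1, by omega⟩, rfl⟩

-- A computes the max-fold of the pair scores
lemma solution_eq_pairs (values : List Int) :
    solution values = (pairsL values).foldl max 0 := by
  unfold solution pairsL
  rw [PySem.List.pyRange_zero_natCast, List.foldl_map]
  rw [← foldl_foldl_max]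
  apply PySem.List.foldl_congr_mem
  intro m i hi
  simp only [List.mem_range] at hi
  have hcast : (values.length : Int) = (((i + 1) + (values.length - (i + 1)) : ℕ) : Int) := by omega
  rw [show ((i : Int) + 1) = (((i + 1 : ℕ)) : Int) by push_cast; ring, hcast,
    pyRange_cast (i + 1) (values.length - (i + 1))]
  simp only [List.foldl_map]
  apply PySem.List.foldl_congr_mem
  intro m' j hj
  simp only [PySem.List.pyGetD_natCast, ite_lt_eq_max, sc]

-- B's loop invariant: starting from (m, bestOf t), folding indices t+1 … t+k yields
-- the max-fold of the columns and bestOf (t+k)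
lemma B_loop (values : List Int) (k : ℕ) : ∀ (t : ℕ) (m : Int),
    ((List.range' (t + 1) k).map (fun j : ℕ => (j : Int))).foldl
      (fun (st : Int × Int) j =>
        let score := st.2 + PySem.List.pyGetD values j 0 - j
        let max_score := if st.1 < score then score else st.1
        let cand := PySem.List.pyGetD values j 0 + j
        (max_score, if st.2 < cand then cand else st.2)) (m, bestOf values t)
    = (((List.range' (t + 1) k).map (col values)).foldl max m, bestOf values (t + k)) := by
  induction k with
  | zero => intro t m; rfl
  | succ k ih =>
    intro t m
    rw [List.range'_succ, List.map_cons, List.map_cons, List.foldl_cons, List.foldl_cons]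
    simp only [PySem.List.pyGetD_natCast, ite_lt_eq_max]
    have hcol : max m (bestOf values t + values.getD (t + 1) 0 - ((t + 1 : ℕ) : Int))
        = max m (col values (t + 1)) := by
      simp [col]
    rw [show bestOf values t ⊔ (values.getD (t + 1) 0 + ((t + 1 : ℕ) : Int))
        = bestOf values (t + 1) by rw [bestOf]]
    rw [show (t + 1) + 1 = (t + 1) + 1 from rfl]
    have := ih (t + 1) (max m (bestOf values t + values.getD (t + 1) 0 - ((t + 1 : ℕ) : Int)))
    simp only [ite_lt_eq_max] at this
    rw [this, hcol, show t + 1 + k = t + (k + 1) by omega]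

-- B computes the max-fold of the columns (for nonempty input)
lemma solution_alt_eq_cols (values : List Int) (h : values ≠ []) :
    solution_alt values = (colsL values).foldl max 0 := by
  rcases values with _ | ⟨v0, rest⟩
  · exact absurd rfl h
  simp only [solution_alt, colsL]
  have hL : (v0 :: rest).length = rest.length + 1 := rfl
  have hlen : ((v0 :: rest).length : Int) = (((1 + ((v0 :: rest).length - 1) : ℕ)) : Int) := by
    omega
  rw [hlen, pyRange_cast_one ((v0 :: rest).length - 1)]
  have h0 : bestOf (v0 :: rest) 0 = v0 := by simp [bestOf]
  rw [show ((0 : Int), v0) = (0, bestOf (v0 :: rest) 0) by rw [h0]]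
  rw [show (List.range' 1 ((v0 :: rest).length - 1)) = (List.range' (0 + 1) ((v0 :: rest).length - 1)) from rfl]
  rw [B_loop (v0 :: rest) ((v0 :: rest).length - 1) 0 0]

-- the two max-folds agree: every pair score is dominated by its column, every column is some pair score
lemma pairs_eq_cols (values : List Int) :
    (pairsL values).foldl max 0 = (colsL values).foldl max 0 := by
  apply le_antisymm
  · apply foldl_max_le (PySem.List.le_foldl_max (colsL values) 0).1
    intro x hx
    rcases mem_pairsL.mp hx with ⟨i, j, hij, hjn, rfl⟩
    have h1 : values.getD i 0 + (i : Int) ≤ bestOf values (j - 1) :=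
      bestOf_ge values (j - 1) i (by omega)
    have h2 : sc values i j ≤ col values j := by
      unfold sc col; omega
    have h3 : col values j ∈ colsL values := mem_colsL.mpr ⟨j, by omega, hjn, rfl⟩
    exact le_trans h2 ((PySem.List.le_foldl_max (colsL values) 0).2 _ h3)
  · apply foldl_max_le (PySem.List.le_foldl_max (pairsL values) 0).1
    intro x hx
    rcases mem_colsL.mp hx with ⟨j, hj1, hjn, rfl⟩
    rcases bestOf_attains values (j - 1) with ⟨i, hi, hb⟩
    have h2 : col values j = sc values i j := by
      unfold col sc; omega
    have h3 : sc values i j ∈ pairsL values := mem_pairsL.mpr ⟨i, j, by omega, hjn, rfl⟩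
    rw [h2]
    exact (PySem.List.le_foldl_max (pairsL values) 0).2 _ h3

-- ===== VERDICT (by name: the statement is the Claim_ definition above) =====
theorem solution_spec : Claim_equal_solution := by
  intro values _
  unfold Spec_solution
  rcases h : values with _ | ⟨v0, rest⟩
  · rfl
  · rw [← h, solution_eq_pairs, solution_alt_eq_cols values (by rw [h]; simp),
      pairs_eq_cols]
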